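-- pv_equiv track=rewrite | github.com/jenapidev/Jean_condos_assesment | Python module/main.py | eights_together
-- ===== SOURCE A (Python) =====
-- def eights_together(vector: [int]) -> bool:
--     eights_indices = [i for i, num in enumerate(vector) if num == 8]
--
--     # No 8s in the vector
--     if not eights_indices:
--         return True
--
--     for i in range(len(eights_indices) - 1):
--         if eights_indices[i + 1] - eights_indices[i] != 1:
--             return False
--
--     return True
-- ===== SOURCE B (Python) =====
-- def eights_together(vector: [int]) -> bool:
--     seen = False
--     finished = False
--     for num in vector:
--         if num == 8:
--             if finished:
--                 return False
--             seen = True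
--         elif seen:
--             finished = True
--     return True
-- ===== Notes on version B (the rewrite author's own statement) =====
-- stated objective: simpler
-- what changed: Replaced the index-list construction plus adjacent-difference loop by a single pass maintaining two booleans (run started / run ended), returning False as soon as an 8 appears after a finished run.
import Mathlib
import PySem

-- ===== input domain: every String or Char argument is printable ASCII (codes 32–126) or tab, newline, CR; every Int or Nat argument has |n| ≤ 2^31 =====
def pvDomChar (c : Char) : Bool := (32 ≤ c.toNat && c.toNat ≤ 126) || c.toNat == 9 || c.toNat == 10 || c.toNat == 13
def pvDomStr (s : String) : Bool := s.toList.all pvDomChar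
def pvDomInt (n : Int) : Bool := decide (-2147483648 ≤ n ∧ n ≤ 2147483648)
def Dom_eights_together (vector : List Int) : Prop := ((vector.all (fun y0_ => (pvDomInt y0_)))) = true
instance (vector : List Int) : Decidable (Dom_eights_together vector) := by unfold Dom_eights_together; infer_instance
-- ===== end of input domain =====

-- ===== PORT A =====
-- B replaces A's index-list + adjacent-difference check by a one-pass two-boolean scan (simpler, O(1) space).
-- helper: the comprehension '[i for i, num in enumerate(vector) if num == 8]' with running index n
def eightsIdxA (n : Int) : List Int → List Int
  | [] => []
  | x :: xs => if x == 8 then n :: eightsIdxA (n + 1) xs else eightsIdxA (n + 1) xs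

-- helper: the loop 'for i in range(len-1): if idx[i+1]-idx[i] != 1: return False'
def adjOkA : List Int → Bool
  | a :: b :: rest => if b - a ≠ 1 then false else adjOkA (b :: rest)
  | _ => true

def eights_together (vector : List Int) : Bool :=
  let eights_indices := eightsIdxA 0 vector
  if eights_indices = [] then true
  else adjOkA eights_indices

-- ===== PORT B =====
def goB : List Int → Bool → Bool → Bool
  | [], _, _ => true
  | x :: xs, seen, finished =>
    if x == 8 then
      if finished then false else goB xs true finished
    else goB xs seen (finished || seen)

def eights_together_alt (vector : List Int) : Bool :=
  goB vector false false

-- ===== PRECONDITION & SPEC =====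
def Spec_eights_together (vector : List Int) (out : Bool) : Prop := out = eights_together_alt vector
instance (vector : List Int) (out : Bool) : Decidable (Spec_eights_together vector out) := by unfold Spec_eights_together; infer_instance

-- ===== CLAIM (what is proved, stated in full; the proofs are below) =====
def Claim_equal_eights_together : Prop := ∀ (vector : List Int), Dom_eights_together vector → Spec_eights_together vector (eights_together vector)

-- ===== LEMMAS AND PROOFS =====

-- with 'finished' set, B returns true iff no 8 remains
theorem goB_finished (ys : List Int) (seen : Bool) :
    goB ys seen true = !(ys.contains 8) := by
  induction ys generalizing seen with
  | nil => simp [goB]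
  | cons y ys ih =>
    by_cases h : y = 8
    · subst h; simp [goB]
    · simp [goB, h, ih, Ne.symm h]

-- indices produced are ≥ the starting offset
theorem eightsIdxA_ge (n : Int) (v : List Int) :
    ∀ j ∈ eightsIdxA n v, n ≤ j := by
  induction v generalizing n with
  | nil => simp [eightsIdxA]
  | cons x xs ih =>
    intro j hj
    simp only [eightsIdxA] at hj
    by_cases h : x = 8
    · simp [h] at hj
      rcases hj with rfl | hj
      · exact le_refl _
      · exact le_trans (by omega) (ih (n + 1) j hj)
    · simp [h] at hj
      exact le_trans (by omega) (ih (n + 1) j hj)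

-- empty index list ↔ no 8 in the suffix
theorem eightsIdxA_nil (n : Int) (v : List Int) :
    eightsIdxA n v = [] ↔ v.contains 8 = false := by
  induction v generalizing n with
  | nil => simp [eightsIdxA]
  | cons x xs ih =>
    by_cases h : x = 8
    · subst h; simp [eightsIdxA]
    · simp [eightsIdxA, h, ih (n + 1), Ne.symm h]

-- run in progress: adjacency from the last seen index n matches B with seen = true
theorem adjOk_run (xs : List Int) (n : Int) :
    adjOkA (n :: eightsIdxA (n + 1) xs) = goB xs true false := by
  induction xs generalizing n with
  | nil => simp [eightsIdxA, adjOkA, goB]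
  | cons y ys ih =>
    by_cases h : y = 8
    · subst h
      rw [show eightsIdxA (n + 1) ((8 : Int) :: ys) = (n + 1) :: eightsIdxA (n + 1 + 1) ys
            from by simp [eightsIdxA]]
      rw [show goB ((8 : Int) :: ys) true false = goB ys true false from by simp [goB]]
      rw [← ih (n + 1)]
      have h1 : (n + 1 : Int) - n = 1 := by ring
      simp [adjOkA, h1]
    · rw [show eightsIdxA (n + 1) (y :: ys) = eightsIdxA (n + 1 + 1) ys
            from by simp [eightsIdxA, h]]
      rw [show goB (y :: ys) true false = goB ys true true from by simp [goB, h]]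
      rw [goB_finished]
      cases hidx : eightsIdxA (n + 1 + 1) ys with
      | nil =>
        have hc := (eightsIdxA_nil (n + 1 + 1) ys).mp hidx
        simp [adjOkA]
        simpa using hc
      | cons j rest =>
        have hj : n + 1 + 1 ≤ j := eightsIdxA_ge _ _ j (by rw [hidx]; exact List.mem_cons_self)
        have hcont : ys.contains 8 = true := by
          by_contra hc
          rw [Bool.not_eq_true] at hc
          rw [(eightsIdxA_nil (n + 1 + 1) ys).mpr hc] at hidx
          simp at hidx
        have hne : j - n ≠ 1 := by omega
        simp [adjOkA, hne]
        simpa using hcont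

-- main: A's whole computation from offset n equals B from the initial state
theorem main_lemma (v : List Int) (n : Int) :
    adjOkA (eightsIdxA n v) = goB v false false := by
  induction v generalizing n with
  | nil => simp [eightsIdxA, adjOkA, goB]
  | cons x xs ih =>
    by_cases h : x = 8
    · subst h
      rw [show eightsIdxA n ((8 : Int) :: xs) = n :: eightsIdxA (n + 1) xs
            from by simp [eightsIdxA]]
      rw [show goB ((8 : Int) :: xs) false false = goB xs true false from by simp [goB]]
      exact adjOk_run xs n
    · rw [show eightsIdxA n (x :: xs) = eightsIdxA (n + 1) xs from by simp [eightsIdxA, h]]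
      rw [show goB (x :: xs) false false = goB xs false false from by simp [goB, h]]
      exact ih (n + 1)

-- ===== VERDICT (by name: the statement is the Claim_ definition above) =====
theorem eights_together_spec : Claim_equal_eights_together := by
  intro v _
  unfold Spec_eights_together eights_together eights_together_alt
  by_cases h : eightsIdxA 0 v = []
  · simp [h, ← main_lemma v 0, adjOkA]
  · simp [h, main_lemma v 0]
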